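-- pv_equiv track=rewrite | github.com/Lugulabre/BWT | BWT.py | dict_col_first
-- ===== SOURCE A (Python) =====
-- import copy
--
-- def dict_col_first(seq):
--     '''Générer dictionnaire correspondant à la colonne 1 de la matrice bwt
--     '''
--     dict_letters = {}
--     seq = list(seq)
--     seq.sort()
--     seq = "".join(seq)
--
--     for letter in range(len(seq)):
--         if seq[letter] in dict_letters:
--             dict_letters[seq[letter]] += 1
--         else:
--             dict_letters[seq[letter]] = 1
--
--     tmp = copy.deepcopy(dict_letters)
--     save_nb = 0
--     for cles in dict_letters.keys():
--         dict_letters[cles] = save_nb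
--         save_nb += tmp[cles]
--
--     return dict_letters
-- ===== SOURCE B (Python) =====
-- def dict_col_first(seq):
--     '''Générer dictionnaire correspondant à la colonne 1 de la matrice bwt
--     '''
--     return {c: sum(1 for x in seq if x < c) for c in sorted(set(seq))}
-- ===== Notes on version B (the rewrite author's own statement) =====
-- stated objective: simpler
-- what changed: A sorts the whole sequence, counts occurrences over the sorted string and converts the counts to offsets with a running prefix sum; B has no counting pass and no accumulator: it maps each distinct character c directly to its rank, the number of characters of the sequence strictly smaller than c, in one dict comprehension over sorted(set(seq)).
import Mathlib
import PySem

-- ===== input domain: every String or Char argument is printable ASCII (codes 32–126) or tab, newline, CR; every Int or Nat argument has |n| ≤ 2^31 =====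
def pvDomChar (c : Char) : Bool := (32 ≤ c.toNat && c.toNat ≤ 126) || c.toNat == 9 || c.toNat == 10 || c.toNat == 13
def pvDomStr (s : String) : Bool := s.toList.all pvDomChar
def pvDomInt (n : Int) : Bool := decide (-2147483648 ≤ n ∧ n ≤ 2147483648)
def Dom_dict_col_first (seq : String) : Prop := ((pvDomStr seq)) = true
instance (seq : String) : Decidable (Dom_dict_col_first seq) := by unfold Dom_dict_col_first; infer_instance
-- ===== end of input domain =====

-- B replaces A's sort-count-and-prefix-sum pipeline by a single dict comprehension mapping each
-- distinct character to its rank (number of strictly smaller characters in seq): simpler, no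
-- counting pass and no running accumulator.
-- Python dict keys are 1-char strings: the ports key by Char and wrap with pvToS at the end.

def pvToS (c : Char) : String := String.ofList [c]

-- ===== PORT A =====
-- the body of A's counting loop: if seq[letter] in dict: += 1 else: = 1
def pvCountStep (d : PySem.Dict Char Int) (ch : Char) : PySem.Dict Char Int :=
  if d.contains ch then d.insert ch (d.getD ch 0 + 1) else d.insert ch 1

def dict_col_first (seq : String) : List (String × Int) :=
  -- seq = "".join(sorted(list(seq))); kept as the sorted char list
  let chars := PySem.List.sorted seq.toList (fun c => c) false
  -- for letter in range(len(seq)): count each character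
  let dict_letters : PySem.Dict Char Int :=
    (PySem.List.pyRange 0 (chars.length : Int) 1).foldl
      (fun d i => pvCountStep d (PySem.List.pyGetD chars i ' '))
      PySem.Dict.empty
  -- tmp = deepcopy(dict_letters); for cles in dict_letters.keys(): overwrite with running offset
  let tmp := dict_letters
  let res :=
    dict_letters.keys.foldl
      (fun (p : PySem.Dict Char Int × Int) cles =>
        (p.1.insert cles p.2, p.2 + tmp.getD cles 0))
      (dict_letters, 0)
  res.1.items.map (fun p => (pvToS p.1, p.2))

-- ===== PORT B =====
def dict_col_first_alt (seq : String) : List (String × Int) :=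
  -- {c: sum(1 for x in seq if x < c) for c in sorted(set(seq))}
  -- (sum of a 0/1 generator = List.countP, the standard-library counterpart)
  let ks := PySem.List.sorted (PySem.Set.ofList seq.toList) (fun c : Char => c) false
  let d : PySem.Dict Char Int :=
    ks.foldl (fun d c => d.insert c (seq.toList.countP (fun x => x < c) : Int))
      PySem.Dict.empty
  d.items.map (fun p => (pvToS p.1, p.2))

-- ===== PRECONDITION & SPEC =====
def Spec_dict_col_first (seq : String) (out : List (String × Int)) : Prop := out = dict_col_first_alt seq
instance (seq : String) (out : List (String × Int)) : Decidable (Spec_dict_col_first seq out) := by unfold Spec_dict_col_first; infer_instance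

-- ===== CLAIM (what is proved, stated in full; the proofs are below) =====
def Claim_equal_dict_col_first : Prop := ∀ (seq : String), Dom_dict_col_first seq → Spec_dict_col_first seq (dict_col_first seq)

-- ===== LEMMAS AND PROOFS =====

-- the cumulative-offset list A's second loop produces
def pvOffsets (g : Char → Int) : List Char → Int → List (Char × Int)
  | [], _ => []
  | k :: ks, s => (k, s) :: pvOffsets g ks (s + g k)

theorem pvOffsets_congr (g h : Char → Int) (ks : List Char) (s : Int)
    (he : ∀ k ∈ ks, g k = h k) : pvOffsets g ks s = pvOffsets h ks s := by
  induction ks generalizing s with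
  | nil => rfl
  | cons k ks ih =>
      simp only [pvOffsets]
      rw [he k (by simp), ih _ (fun x hx => he x (by simp [hx]))]

theorem pvOfList_sublist {α : Type} [BEq α] [LawfulBEq α] (xs : List α) :
    List.Sublist (PySem.Set.ofList xs) xs := by
  induction xs with
  | nil => rw [PySem.Set.ofList_nil]
  | cons x xs ih =>
      rw [PySem.Set.ofList_cons]
      have hd : List.Sublist ((PySem.Set.ofList xs).discard x) (PySem.Set.ofList xs) := by
        simp only [PySem.Set.discard]
        exact List.filter_sublist
      exact List.Sublist.cons₂ x (hd.trans ih)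

-- B's loop: inserting fresh keys appends, items = the comprehension's pair list
theorem pvLoopB (f : Char → Int) (ks : List Char) (d : PySem.Dict Char Int)
    (hfresh : ∀ k ∈ ks, d.contains k = false) (hnd : ks.Nodup) :
    (List.foldl (fun (d : PySem.Dict Char Int) c => d.insert c (f c)) d ks).items
      = d.items ++ ks.map (fun c => (c, f c)) := by
  induction ks generalizing d with
  | nil => simp
  | cons k ks ih =>
      simp only [List.foldl_cons, List.map_cons]
      have hfresh' : ∀ k' ∈ ks, ((d.insert k (f k)).contains k') = false := by
        intro k' hk'
        rw [PySem.Dict.contains_insert]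
        have hne : (k' == k) = false :=
          beq_eq_false_iff_ne.mpr (fun h => (List.nodup_cons.mp hnd).1 (h ▸ hk'))
        simp [hne, hfresh k' (by simp [hk'])]
      rw [ih (d.insert k (f k)) hfresh' (List.nodup_cons.mp hnd).2]
      rw [PySem.Dict.items_insert_of_not_contains d (f k) (hfresh k (by simp))]
      simp

-- A's second loop: overwriting each existing key in turn rewrites the items in place
theorem pvLoopA (g : Char → Int) (done todo : List (Char × Int)) (s : Int)
    (hnd : ((done ++ todo).map (fun p => p.1)).Nodup) :
    ((List.foldl (fun (p : PySem.Dict Char Int × Int) c => (p.1.insert c p.2, p.2 + g c))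
        (PySem.Dict.mk (done ++ todo), s) (todo.map (fun p => p.1))).1).items
      = done ++ pvOffsets g (todo.map (fun p => p.1)) s := by
  induction todo generalizing done s with
  | nil => simp [pvOffsets]
  | cons kv todo ih =>
      obtain ⟨k, v⟩ := kv
      simp only [List.map_cons, List.foldl_cons, pvOffsets]
      have hnd' : ((done.map (fun p => p.1)) ++ k :: todo.map (fun p => p.1)).Nodup := by
        simpa using hnd
      have hmem : (PySem.Dict.mk (done ++ (k, v) :: todo)).contains k = true := by
        rw [PySem.Dict.contains_iff_mem_keys]
        show k ∈ (done ++ (k, v) :: todo).map (fun p => p.1)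
        simp
      have hkey : ∀ p ∈ done ++ todo, (p.1 == k) = false := by
        intro p hp
        apply beq_eq_false_iff_ne.mpr
        intro hk
        have h1 : k ∈ done.map (fun p => p.1) ++ todo.map (fun p => p.1) := by
          rcases List.mem_append.mp hp with h | h
          · exact List.mem_append_left _ (hk ▸ List.mem_map_of_mem h)
          · exact List.mem_append_right _ (hk ▸ List.mem_map_of_mem h)
        rcases List.mem_append.mp h1 with h | h
        · exact (List.disjoint_of_nodup_append hnd') h (by simp)
        · exact (List.nodup_cons.mp hnd'.of_append_right).1 h
      have hins : (PySem.Dict.mk (done ++ (k, v) :: todo)).insert k s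
          = PySem.Dict.mk ((done ++ [(k, s)]) ++ todo) := by
        apply PySem.Dict.ext
        rw [PySem.Dict.items_insert_of_contains _ _ hmem]
        show (done ++ (k, v) :: todo).map (fun p => if (p.1 == k) = true then (k, s) else p)
            = ((done ++ [(k, s)]) ++ todo)
        rw [List.map_append, List.map_cons]
        have h1 : done.map (fun p => if (p.1 == k) = true then (k, s) else p) = done := by
          conv_rhs => rw [← List.map_id done]
          exact List.map_congr_left fun p hp => by simp [hkey p (List.mem_append_left _ hp)]
        have h2 : todo.map (fun p => if (p.1 == k) = true then (k, s) else p) = todo := by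
          conv_rhs => rw [← List.map_id todo]
          exact List.map_congr_left fun p hp => by simp [hkey p (List.mem_append_right _ hp)]
        rw [h1, h2]
        simp
      rw [hins, ih (done ++ [(k, s)]) (s + g k) (by simpa using hnd)]
      simp

-- countP of a disjunction of disjoint predicates adds up
theorem pvCountP_or (p q : Char → Bool) (l : List Char) (h : ∀ x ∈ l, ¬(p x = true ∧ q x = true)) :
    l.countP (fun x => p x || q x) = l.countP p + l.countP q := by
  induction l with
  | nil => simp
  | cons a l ih =>
      have ih' := ih (fun x hx => h x (by simp [hx]))
      by_cases hp : p a = true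
      · have hq : q a = false := by
          rcases Bool.eq_false_or_eq_true (q a) with h' | h'
          · exact absurd ⟨hp, h'⟩ (h a (by simp))
          · exact h'
        simp [hp, hq, ih']
        omega
      · have hp' : p a = false := by simpa using hp
        by_cases hq : q a = true
        · simp [hp', hq, ih']; omega
        · have hq' : q a = false := by simpa using hq
          simp [hp', hq', ih']

-- the prefix sums of the per-key counts over a strictly sorted key list are the ranks
theorem pvOffsets_rank (l : List Char) (ks : List Char) (s : Int)
    (hsorted : List.Pairwise (fun a b : Char => a < b) ks)
    (hmem : ∀ x ∈ l, (∃ k ∈ ks, k ≤ x) → x ∈ ks)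
    (hs0 : ∀ k, ks.head? = some k → s = (l.countP (fun x => x < k) : Int)) :
    pvOffsets (fun k => (l.count k : Int)) ks s
      = ks.map (fun k => (k, (l.countP (fun x => x < k) : Int))) := by
  induction ks generalizing s with
  | nil => rfl
  | cons k ks ih =>
      have hpw := List.pairwise_cons.mp hsorted
      have hsval : s = (l.countP (fun x => x < k) : Int) := hs0 k rfl
      simp only [pvOffsets, List.map_cons, hsval]
      refine List.cons_eq_cons.mpr ⟨rfl, ?_⟩
      refine ih _ hpw.2 ?_ ?_
      · intro x hx ⟨k', hk', hle⟩
        have hxin : x ∈ k :: ks := hmem x hx ⟨k', by simp [hk'], hle⟩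
        rcases List.mem_cons.mp hxin with h | h
        · exact absurd (lt_of_lt_of_le (hpw.1 k' hk') hle) (by rw [h]; exact lt_irrefl k)
        · exact h
      · intro k' hk'
        have hk'mem : k' ∈ ks := by
          cases ks with
          | nil => simp at hk'
          | cons a t => simp at hk'; simp [hk']
        have hkk' : k < k' := hpw.1 k' hk'mem
        have hhead : ∀ x ∈ ks, k' ≤ x := by
          cases ks with
          | nil => simp at hk'
          | cons a t =>
              intro x hxks
              have ha : a = k' := by simpa using hk'
              subst ha
              rcases List.mem_cons.mp hxks with h | h
              · exact le_of_eq h.symm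
              · exact le_of_lt ((List.pairwise_cons.mp hpw.2).1 x h)
        -- countP (< k') = countP (< k) + count k
        have hsplit : l.countP (fun x => x < k') = l.countP (fun x => x < k) + l.count k := by
          have hcong : l.countP (fun x => x < k')
              = l.countP (fun x => decide (x < k) || (x == k)) := by
            apply List.countP_congr
            intro x hx
            constructor
            · intro hlt
              by_cases hxk : x < k
              · simp [hxk]
              · have hkx : k ≤ x := le_of_not_gt hxk
                have hxin : x ∈ k :: ks := hmem x hx ⟨k, by simp, hkx⟩
                rcases List.mem_cons.mp hxin with h | h
                · simp [h]
                · exact absurd (of_decide_eq_true hlt) (not_lt.mpr (hhead x h))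
            · intro hor
              rcases Bool.or_eq_true_iff.mp hor with h | h
              · exact decide_eq_true (lt_trans (of_decide_eq_true h) hkk')
              · exact decide_eq_true (by rw [eq_of_beq h]; exact hkk')
          have hdisj : ∀ x ∈ l, ¬(decide (x < k) = true ∧ (x == k) = true) := by
            intro x hx hb
            exact absurd (of_decide_eq_true hb.1) (by rw [eq_of_beq hb.2]; exact lt_irrefl k)
          rw [hcong, pvCountP_or _ _ l hdisj]
          simp [List.count_eq_countP]
        rw [hsplit]
        push_cast
        ring

theorem dict_col_first_eq (seq : String) :
    dict_col_first seq = dict_col_first_alt seq := by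
  have hstep : pvCountStep = fun (d : PySem.Dict Char Int) (c : Char) => d.insert c (d.getD c 0 + 1) := by
    funext d c
    unfold pvCountStep
    by_cases h : d.contains c = true
    · simp [h]
    · have h' : d.contains c = false := by simpa using h
      rw [if_neg (by simp [h']), PySem.Dict.getD_of_not_contains d 0 h']
      norm_num
  simp only [dict_col_first, dict_col_first_alt]
  set cs := PySem.List.sorted seq.toList (fun c : Char => c) false with hcs
  have hperm : cs.Perm seq.toList := by
    rw [hcs]; exact PySem.List.sorted_perm seq.toList (fun c => c) false
  -- A's counting loop builds Counter(sorted(seq))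
  have hAcount : List.foldl (fun d i => pvCountStep d (PySem.List.pyGetD cs i ' '))
      PySem.Dict.empty (PySem.List.pyRange 0 (cs.length : Int) 1) = PySem.Dict.counter cs := by
    rw [PySem.List.foldl_pyRange_zero_pyGetD', hstep]
    exact PySem.Dict.foldl_insert_getD_add_one_eq_counter cs
  rw [hAcount]
  -- sorted(set(seq)) = set(sorted(seq)), and it is strictly sorted
  have hnd := PySem.Set.nodup_ofList (α := Char) cs
  have hlt : List.Pairwise (fun a b : Char => a < b) (PySem.Set.ofList cs) := by
    have hle : List.Pairwise (fun a b : Char => a ≤ b) cs := by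
      rw [hcs]
      simpa using PySem.List.sorted_pairwise seq.toList (fun c : Char => c)
    have hp1 : List.Pairwise (fun a b : Char => a ≤ b) (PySem.Set.ofList cs) :=
      hle.sublist (pvOfList_sublist cs)
    exact (hp1.and hnd).imp (fun h => lt_of_le_of_ne h.1 h.2)
  have hK : PySem.List.sorted (PySem.Set.ofList seq.toList) (fun c : Char => c) false
      = PySem.Set.ofList cs := by
    apply PySem.List.sorted_eq_of_perm_of_pairwise_lt
    · rw [List.perm_ext_iff_of_nodup hnd (PySem.Set.nodup_ofList seq.toList)]
      intro x
      rw [PySem.Set.mem_ofList, PySem.Set.mem_ofList]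
      exact hperm.mem_iff
    · exact hlt
  simp only [PySem.Dict.keys_counter]
  rw [hK]
  -- A's second loop produces pvOffsets over the key list
  have hAloop : ((List.foldl
      (fun (p : PySem.Dict Char Int × Int) cles =>
        (p.1.insert cles p.2, p.2 + (PySem.Dict.counter cs).getD cles 0))
      (PySem.Dict.counter cs, 0) (PySem.Set.ofList cs)).1).items
      = pvOffsets (fun c => (PySem.Dict.counter cs).getD c 0) (PySem.Set.ofList cs) 0 := by
    have hm : List.map (fun p => p.1) (PySem.Dict.counter cs).items = PySem.Set.ofList cs :=
      PySem.Dict.keys_counter cs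
    have h := pvLoopA (fun c => (PySem.Dict.counter cs).getD c 0)
      [] ((PySem.Dict.counter cs).items) 0
      (by rw [List.nil_append, hm]; exact PySem.Set.nodup_ofList cs)
    rw [List.nil_append, hm] at h
    exact h
  -- B's dict comprehension produces the rank pairs directly
  have hBloop : (List.foldl
      (fun (d : PySem.Dict Char Int) c => d.insert c (seq.toList.countP (fun x => x < c) : Int))
      PySem.Dict.empty (PySem.Set.ofList cs)).items
      = (PySem.Set.ofList cs).map
          (fun c => (c, (seq.toList.countP (fun x => x < c) : Int))) := by
    have h := pvLoopB (fun c => (seq.toList.countP (fun x => x < c) : Int)) (PySem.Set.ofList cs)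
      PySem.Dict.empty (fun k _ => PySem.Dict.contains_empty k) hnd
    simpa using h
  rw [hAloop, hBloop]
  -- per-key getD-of-counter values are the counts of the original sequence
  have hg : pvOffsets (fun c => (PySem.Dict.counter cs).getD c 0) (PySem.Set.ofList cs) 0
      = pvOffsets (fun c => (seq.toList.count c : Int)) (PySem.Set.ofList cs) 0 := by
    apply pvOffsets_congr
    intro k _
    simp [PySem.Dict.getD_counter, hperm.count_eq]
  rw [hg]
  -- the prefix sums of the counts are exactly B's ranks
  apply congrArg (List.map _)
  apply pvOffsets_rank seq.toList (PySem.Set.ofList cs) 0 hlt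
  · intro x hx _
    rw [PySem.Set.mem_ofList]
    exact hperm.mem_iff.mpr hx
  · intro k hk
    have hkmem : k ∈ PySem.Set.ofList cs := by
      cases h : PySem.Set.ofList cs with
      | nil => rw [h] at hk; simp at hk
      | cons a t => rw [h] at hk; simp at hk; simp [hk]
    have hmin : ∀ x ∈ seq.toList, ¬(x < k) := by
      intro x hx hxk
      have hxin : x ∈ PySem.Set.ofList cs := by
        rw [PySem.Set.mem_ofList]; exact hperm.mem_iff.mpr hx
      -- k is the head of a strictly sorted list, so k ≤ every member
      have : k ≤ x := by
        cases hK' : PySem.Set.ofList cs with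
        | nil => rw [hK'] at hxin; simp at hxin
        | cons a t =>
            rw [hK'] at hk hxin hlt
            have hka : a = k := by simpa using hk
            subst hka
            rcases List.mem_cons.mp hxin with h | h
            · rw [h]
            · exact le_of_lt ((List.pairwise_cons.mp hlt).1 x h)
      exact absurd hxk (not_lt.mpr this)
    have : seq.toList.countP (fun x => x < k) = 0 := by
      rw [List.countP_eq_zero]
      intro x hx
      simpa using hmin x hx
    rw [this]
    rfl

-- ===== VERDICT (by name: the statement is the Claim_ definition above) =====
theorem dict_col_first_spec : Claim_equal_dict_col_first := by
  intro seq _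
  unfold Spec_dict_col_first
  exact dict_col_first_eq seq
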